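-- pv_equiv track=rewrite | github.com/alexisargyris/lit-critic | lit_platform/services/index_service.py | _stamp_auto_marker
-- ===== SOURCE A (Python) =====
-- _AUTO_MARKER_PREFIX = "<!-- ⚡ auto:"
--
-- def _stamp_auto_marker(draft: str, scene_id: str) -> str:
--     """Add an auto marker comment to the heading line of *draft*."""
--     if _AUTO_MARKER_PREFIX in draft:
--         return draft  # already stamped
--
--     lines = draft.split("\n")
--     for i, line in enumerate(lines):
--         stripped = line.strip()
--         if stripped:  # first non-empty line
--             marker = f"  {_AUTO_MARKER_PREFIX} {scene_id} -->" if scene_id else f"  {_AUTO_MARKER_PREFIX} -->"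
--             lines[i] = line.rstrip() + marker
--             break
--     return "\n".join(lines)
-- ===== SOURCE B (Python) =====
-- _AUTO_MARKER_PREFIX = "<!-- ⚡ auto:"
--
-- def _stamp_auto_marker(draft: str, scene_id: str) -> str:
--     """Splice the auto marker into the first non-blank line of the original
--     string (lstrip + find), instead of splitting into a list of lines."""
--     if _AUTO_MARKER_PREFIX in draft:
--         return draft
--     body = draft.lstrip()
--     if not body:
--         return draft
--     head = draft[:len(draft) - len(body)]
--     nl = body.find("\n")
--     line, tail = (body, "") if nl == -1 else (body[:nl], body[nl:])
--     marker = f"  {_AUTO_MARKER_PREFIX} {scene_id} -->" if scene_id else f"  {_AUTO_MARKER_PREFIX} -->"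
--     return head + line.rstrip() + marker + tail
-- ===== Notes on version B (the rewrite author's own statement) =====
-- stated objective: alternative
-- what changed: B splices the marker directly into the original string (lstrip to find the first non-whitespace character, find('\n') for the end of its line, rstrip the line, concatenate the four pieces) instead of A's split('\n') into a list, indexed for-loop over the lines with an in-place mutation and break, and '\n'.join.
import Mathlib
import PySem

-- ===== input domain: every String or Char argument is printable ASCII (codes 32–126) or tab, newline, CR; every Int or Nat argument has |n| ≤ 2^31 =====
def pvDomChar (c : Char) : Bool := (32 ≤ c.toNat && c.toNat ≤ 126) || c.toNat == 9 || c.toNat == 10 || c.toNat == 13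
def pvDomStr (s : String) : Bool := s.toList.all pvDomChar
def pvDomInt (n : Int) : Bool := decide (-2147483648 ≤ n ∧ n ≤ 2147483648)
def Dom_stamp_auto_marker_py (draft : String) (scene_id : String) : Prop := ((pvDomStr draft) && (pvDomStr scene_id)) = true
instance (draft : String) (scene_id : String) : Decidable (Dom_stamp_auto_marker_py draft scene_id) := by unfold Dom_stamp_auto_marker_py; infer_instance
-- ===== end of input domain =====

-- B splices the marker into the first non-blank line of the original string (lstrip + find),
-- instead of A's split-into-lines / indexed loop / join; alternative decomposition, same cost.

-- ===== PORT A =====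
-- marker = f"  {_AUTO_MARKER_PREFIX} {scene_id} -->" if scene_id else f"  {_AUTO_MARKER_PREFIX} -->"
def pvMarkerA (scene_id : List Char) : List Char :=
  if scene_id ≠ [] then "  <!-- ⚡ auto: ".toList ++ scene_id ++ " -->".toList
  else "  <!-- ⚡ auto: -->".toList

-- the for-loop with break: walk the lines, stamp the first whose strip() is non-empty
def pvStampLoopA (scene_id : List Char) : List (List Char) → List (List Char)
  | [] => []
  | line :: rest =>
    if PySem.Chars.strip line ≠ [] then
      (PySem.Chars.rstrip line ++ pvMarkerA scene_id) :: rest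
    else line :: pvStampLoopA scene_id rest

-- draft.split("\n") → splitOn; "\n".join(lines) → join
def pvJoinA (scene_id cs : List Char) : List Char :=
  PySem.Chars.join ['\n'] (pvStampLoopA scene_id (PySem.Chars.splitOn cs ['\n']))

def stamp_auto_marker_py (draft : String) (scene_id : String) : String :=
  if PySem.Str.isIn "<!-- ⚡ auto:" draft then draft
  else String.ofList (pvJoinA scene_id.toList draft.toList)

-- ===== PORT B =====
def pvMarkerB (scene_id : List Char) : List Char :=
  if scene_id ≠ [] then "  <!-- ⚡ auto: ".toList ++ scene_id ++ " -->".toList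
  else "  <!-- ⚡ auto: -->".toList

-- body = draft.lstrip(); head = draft[:len-len(body)]; nl = body.find("\n"); splice.
-- draft[:k], body[:nl], body[nl:] have non-negative bounds, so they are List.take/drop exactly.
def pvSpliceB (scene_id cs : List Char) : List Char :=
  let body := PySem.Chars.lstrip cs
  if body = [] then cs
  else
    let head := cs.take (cs.length - body.length)
    let nl := PySem.Chars.find body ['\n']
    let line := if nl = -1 then body else body.take nl.toNat
    let tail := if nl = -1 then ([] : List Char) else body.drop nl.toNat
    head ++ PySem.Chars.rstrip line ++ pvMarkerB scene_id ++ tail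

def stamp_auto_marker_py_alt (draft : String) (scene_id : String) : String :=
  if PySem.Str.isIn "<!-- ⚡ auto:" draft then draft
  else String.ofList (pvSpliceB scene_id.toList draft.toList)

-- ===== PRECONDITION & SPEC =====
def Spec_stamp_auto_marker_py (draft : String) (scene_id : String) (out : String) : Prop := out = stamp_auto_marker_py_alt draft scene_id
instance (draft : String) (scene_id : String) (out : String) : Decidable (Spec_stamp_auto_marker_py draft scene_id out) := by unfold Spec_stamp_auto_marker_py; infer_instance

-- ===== CLAIM (what is proved, stated in full; the proofs are below) =====
def Claim_equal_stamp_auto_marker_py : Prop := ∀ (draft : String) (scene_id : String), Dom_stamp_auto_marker_py draft scene_id → Spec_stamp_auto_marker_py draft scene_id (stamp_auto_marker_py draft scene_id)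

-- ===== LEMMAS AND PROOFS =====

-- splitOn.go: the accumulator is a prefix
theorem pv_go_acc (fuel : Nat) : ∀ (l cur : List Char) (accL : List (List Char)),
    PySem.Chars.splitOn.go ['\n'] fuel l cur accL =
      accL.reverse ++ PySem.Chars.splitOn.go ['\n'] fuel l cur [] := by
  induction fuel with
  | zero => intro l cur accL; simp [PySem.Chars.splitOn.go]
  | succ fuel ih =>
    intro l cur accL
    cases l with
    | nil => simp [PySem.Chars.splitOn.go]
    | cons c rest =>
      rw [PySem.Chars.splitOn.go, PySem.Chars.splitOn.go]
      by_cases hc : List.isPrefixOf ['\n'] (c :: rest)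
      · simp only [hc, ite_true]
        rw [ih _ [] (cur.reverse :: accL), ih _ [] ([cur.reverse])]
        simp
      · simp only [hc]
        exact ih _ _ accL

-- splitOn.go ignores fuel past the length of the list
theorem pv_go_fuel : ∀ (l : List Char) (fuel fuel' : Nat) (cur : List Char),
    l.length ≤ fuel → l.length ≤ fuel' →
    PySem.Chars.splitOn.go ['\n'] fuel l cur [] = PySem.Chars.splitOn.go ['\n'] fuel' l cur [] := by
  intro l
  induction l with
  | nil =>
    intro fuel fuel' cur _ _
    cases fuel <;> cases fuel' <;> simp [PySem.Chars.splitOn.go]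
  | cons c rest ih =>
    intro fuel fuel' cur hf hf'
    cases fuel with
    | zero => simp at hf
    | succ f =>
      cases fuel' with
      | zero => simp at hf'
      | succ f' =>
        rw [PySem.Chars.splitOn.go, PySem.Chars.splitOn.go]
        by_cases hc : List.isPrefixOf ['\n'] (c :: rest)
        · simp only [hc, if_pos]
          have hdrop : List.drop (['\n'] : List Char).length (c :: rest) = rest := rfl
          rw [hdrop]
          rw [pv_go_acc f _ [] [cur.reverse], pv_go_acc f' _ [] [cur.reverse]]
          simp only [List.length_cons] at hf hf'
          rw [ih f f' [] (by simpa using Nat.le_of_succ_le_succ hf) (by simpa using Nat.le_of_succ_le_succ hf')]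
        · simp only [hc]
          simp only [List.length_cons] at hf hf'
          exact ih f f' (c :: cur) (Nat.le_of_succ_le_succ hf) (Nat.le_of_succ_le_succ hf')

-- splitOn.go on a newline-free list
theorem pv_go_no_nl : ∀ (l : List Char) (fuel : Nat) (cur : List Char), '\n' ∉ l → l.length ≤ fuel →
    PySem.Chars.splitOn.go ['\n'] fuel l cur [] = [cur.reverse ++ l] := by
  intro l
  induction l with
  | nil => intro fuel cur _ _; cases fuel <;> simp [PySem.Chars.splitOn.go]
  | cons c rest ih =>
    intro fuel cur hnl hf
    cases fuel with
    | zero => simp at hf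
    | succ f =>
      rw [PySem.Chars.splitOn.go]
      have hc : ¬ List.isPrefixOf ['\n'] (c :: rest) := by
        simp [List.isPrefixOf]
        intro h; exact absurd h.symm (by simp at hnl; exact fun h' => hnl.1 h'.symm)
      simp only [hc]
      rw [ih f (c :: cur) (by simp at hnl ⊢; exact hnl.2) (by simpa using Nat.le_of_succ_le_succ hf)]
      simp

theorem pv_splitOn_no_nl (l : List Char) (h : '\n' ∉ l) :
    PySem.Chars.splitOn l ['\n'] = [l] := by
  rw [PySem.Chars.splitOn, pv_go_no_nl l (l.length + 1) [] h (Nat.le_succ _)]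
  simp

-- splitting off the first line
theorem pv_go_first_line : ∀ (l : List Char) (fuel : Nat) (cur rest : List Char), '\n' ∉ l →
    l.length + rest.length + 1 ≤ fuel →
    PySem.Chars.splitOn.go ['\n'] fuel (l ++ '\n' :: rest) cur [] =
      (cur.reverse ++ l) :: PySem.Chars.splitOn rest ['\n'] := by
  intro l
  induction l with
  | nil =>
    intro fuel cur rest _ hf
    cases fuel with
    | zero => simp at hf
    | succ f =>
      rw [List.nil_append, PySem.Chars.splitOn.go]
      have hc : List.isPrefixOf ['\n'] ('\n' :: rest) = true := by simp [List.isPrefixOf]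
      simp only [hc, if_pos]
      have hdrop : List.drop (['\n'] : List Char).length ('\n' :: rest) = rest := rfl
      rw [hdrop, pv_go_acc f _ [] [cur.reverse]]
      rw [pv_go_fuel rest f (rest.length + 1) [] (by simp at hf; omega) (Nat.le_succ _)]
      simp [PySem.Chars.splitOn]
  | cons c l ih =>
    intro fuel cur rest hnl hf
    cases fuel with
    | zero => simp at hf
    | succ f =>
      rw [List.cons_append, PySem.Chars.splitOn.go]
      have hc : ¬ List.isPrefixOf ['\n'] (c :: (l ++ '\n' :: rest)) := by
        simp [List.isPrefixOf]
        intro h; exact absurd h.symm (by simp at hnl; exact fun h' => hnl.1 h'.symm)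
      simp only [hc]
      rw [ih f (c :: cur) rest (by simp at hnl ⊢; exact hnl.2) (by simp at hf ⊢; omega)]
      simp

theorem pv_splitOn_first_line (l rest : List Char) (h : '\n' ∉ l) :
    PySem.Chars.splitOn (l ++ '\n' :: rest) ['\n'] = l :: PySem.Chars.splitOn rest ['\n'] := by
  rw [PySem.Chars.splitOn, pv_go_first_line l _ [] rest h (by simp)]
  simp

-- every list decomposes at its first newline
theorem pv_decomp (cs : List Char) :
    '\n' ∉ cs ∨ ∃ l rest, cs = l ++ '\n' :: rest ∧ '\n' ∉ l := by
  induction cs with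
  | nil => left; simp
  | cons c cs ih =>
    by_cases hc : c = '\n'
    · right; exact ⟨[], cs, by simp [hc], by simp⟩
    · rcases ih with h | ⟨l, rest, hcs, hl⟩
      · left; simp [h, Ne.symm hc]
      · right; exact ⟨c :: l, rest, by simp [hcs], by simp [hl, Ne.symm hc]⟩

theorem pv_splitOn_ne_nil (cs : List Char) : PySem.Chars.splitOn cs ['\n'] ≠ [] := by
  rcases pv_decomp cs with h | ⟨l, rest, hcs, hl⟩
  · rw [pv_splitOn_no_nl cs h]; simp
  · rw [hcs, pv_splitOn_first_line l rest hl]; simp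

-- join ∘ splitOn = id
theorem pv_join_splitOn : ∀ (n : Nat) (cs : List Char), cs.length ≤ n →
    PySem.Chars.join ['\n'] (PySem.Chars.splitOn cs ['\n']) = cs := by
  intro n
  induction n with
  | zero =>
    intro cs h
    have : cs = [] := by cases cs <;> simp_all
    subst this
    rw [pv_splitOn_no_nl [] (by simp)]; simp [PySem.Chars.join, List.intercalate]
  | succ n ih =>
    intro cs h
    rcases pv_decomp cs with hno | ⟨l, rest, hcs, hl⟩
    · rw [pv_splitOn_no_nl cs hno]; simp [PySem.Chars.join, List.intercalate]
    · subst hcs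
      rw [pv_splitOn_first_line l rest hl]
      obtain ⟨s, ss, hss⟩ : ∃ s ss, PySem.Chars.splitOn rest ['\n'] = s :: ss := by
        cases hr : PySem.Chars.splitOn rest ['\n'] with
        | nil => exact absurd hr (pv_splitOn_ne_nil rest)
        | cons s ss => exact ⟨s, ss, rfl⟩
      have hrest : rest.length ≤ n := by simp at h; omega
      have := ih rest hrest
      rw [hss] at this ⊢
      simp only [PySem.Chars.join, List.intercalate] at this ⊢
      simp [this]

-- find on a single-character needle
theorem pv_findgo_no_nl : ∀ (s : List Char) (k : Nat), '\n' ∉ s →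
    PySem.Chars.find.go ['\n'] s k = -1 := by
  intro s
  induction s with
  | nil => intro k _; simp [PySem.Chars.find.go]
  | cons c t ih =>
    intro k h
    rw [PySem.Chars.find.go]
    simp at h
    have : ¬ List.isPrefixOf ['\n'] (c :: t) := by
      simp [List.isPrefixOf]; intro hx; exact absurd hx.symm (fun h' => h.1 h'.symm)
    simp only [this]
    exact ih (k + 1) h.2

theorem pv_findgo_nl : ∀ (a : List Char) (r : List Char) (k : Nat), '\n' ∉ a →
    PySem.Chars.find.go ['\n'] (a ++ '\n' :: r) k = (k : Int) + a.length := by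
  intro a
  induction a with
  | nil => intro r k _; rw [List.nil_append, PySem.Chars.find.go]; simp [List.isPrefixOf]
  | cons c t ih =>
    intro r k h
    rw [List.cons_append, PySem.Chars.find.go]
    simp at h
    have : ¬ List.isPrefixOf ['\n'] (c :: (t ++ '\n' :: r)) := by
      simp [List.isPrefixOf]; intro hx; exact absurd hx.symm (fun h' => h.1 h'.symm)
    simp only [this]
    rw [ih r (k + 1) h.2]
    push_cast [List.length_cons]; ring

theorem pv_find_no_nl (s : List Char) (h : '\n' ∉ s) : PySem.Chars.find s ['\n'] = -1 :=
  pv_findgo_no_nl s 0 h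

theorem pv_find_nl (a r : List Char) (h : '\n' ∉ a) :
    PySem.Chars.find (a ++ '\n' :: r) ['\n'] = (a.length : Int) := by
  rw [PySem.Chars.find, pv_findgo_nl a r 0 h]; simp

-- rstrip over an all-whitespace prefix
theorem pv_rstrip_append (w d : List Char) (h : ∃ c ∈ d, ¬ PySem.Chars.isspace c) :
    PySem.Chars.rstrip (w ++ d) = w ++ PySem.Chars.rstrip d := by
  simp only [PySem.Chars.rstrip, List.reverse_append]
  have hne : List.dropWhile PySem.Chars.isspace d.reverse ≠ [] := by
    rw [Ne, List.dropWhile_eq_nil_iff]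
    push Not
    obtain ⟨c, hc, hcs⟩ := h
    exact ⟨c, by simpa using hc, by simpa using hcs⟩
  rw [List.dropWhile_append]
  simp only [List.isEmpty_iff, hne, ite_false]
  simp

-- strip is empty iff every character is whitespace
theorem pv_strip_eq_nil_iff (l : List Char) :
    PySem.Chars.strip l = [] ↔ ∀ c ∈ l, PySem.Chars.isspace c := by
  simp only [PySem.Chars.strip, PySem.Chars.rstrip, PySem.Chars.lstrip]
  rw [List.reverse_eq_nil_iff, List.dropWhile_eq_nil_iff]
  constructor
  · intro h c hc
    by_cases htw : c ∈ List.takeWhile PySem.Chars.isspace l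
    · exact List.mem_takeWhile_imp htw
    · have : c ∈ List.dropWhile PySem.Chars.isspace l := by
        have := List.takeWhile_append_dropWhile (p := PySem.Chars.isspace) (l := l)
        rw [← this] at hc
        rcases List.mem_append.mp hc with h1 | h2
        · exact absurd h1 htw
        · exact h2
      exact h c (by simpa using this)
  · intro h c hc
    exact h c ((List.dropWhile_sublist PySem.Chars.isspace).mem (by simpa using hc))

-- lstrip structure
theorem pv_lstrip_decomp (cs : List Char) :
    cs = List.takeWhile PySem.Chars.isspace cs ++ PySem.Chars.lstrip cs :=
  (List.takeWhile_append_dropWhile).symm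
-- lstrip is empty / non-empty according to the whitespace content
theorem pv_lstrip_eq_nil (l : List Char) (hall : ∀ c ∈ l, PySem.Chars.isspace c) :
    PySem.Chars.lstrip l = [] := by
  simp [PySem.Chars.lstrip, List.dropWhile_eq_nil_iff]
  exact hall

theorem pv_lstrip_ne_nil (l : List Char) (hex : ∃ c ∈ l, ¬ PySem.Chars.isspace c) :
    PySem.Chars.lstrip l ≠ [] := by
  rw [Ne, PySem.Chars.lstrip, List.dropWhile_eq_nil_iff]
  push Not
  obtain ⟨c, hc, hcs⟩ := hex
  exact ⟨c, hc, by simpa using hcs⟩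

theorem pv_mem_lstrip (l : List Char) (hex : ∃ c ∈ l, ¬ PySem.Chars.isspace c) :
    ∃ c ∈ PySem.Chars.lstrip l, ¬ PySem.Chars.isspace c := by
  obtain ⟨c, hc, hcs⟩ := hex
  by_cases htw : c ∈ List.takeWhile PySem.Chars.isspace l
  · exact absurd (List.mem_takeWhile_imp htw) hcs
  · refine ⟨c, ?_, hcs⟩
    have h2 := hc
    rw [pv_lstrip_decomp l] at h2
    rcases List.mem_append.mp h2 with h1 | h1
    · exact absurd h1 htw
    · exact h1

-- draft[:len(draft)-len(body)] is the whitespace prefix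
theorem pv_take_head (cs : List Char) :
    cs.take (cs.length - (PySem.Chars.lstrip cs).length) = List.takeWhile PySem.Chars.isspace cs := by
  set tw := List.takeWhile PySem.Chars.isspace cs with htw
  set dw := PySem.Chars.lstrip cs with hdw
  have heq : tw ++ dw = cs := List.takeWhile_append_dropWhile
  have h1 : cs.length = tw.length + dw.length := by rw [← heq]; simp
  rw [show cs.length - dw.length = tw.length by omega, ← heq, List.take_left]

-- rstrip keeps the all-whitespace prefix
theorem pv_rstrip_split (l : List Char) (hex : ∃ c ∈ l, ¬ PySem.Chars.isspace c) :
    PySem.Chars.rstrip l =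
      List.takeWhile PySem.Chars.isspace l ++ PySem.Chars.rstrip (PySem.Chars.lstrip l) := by
  have hr := pv_rstrip_append (List.takeWhile PySem.Chars.isspace l) (PySem.Chars.lstrip l)
    (pv_mem_lstrip l hex)
  rw [← pv_lstrip_decomp l] at hr
  exact hr

theorem pv_join_one (a : List Char) : PySem.Chars.join ['\n'] [a] = a := by
  simp [PySem.Chars.join, List.intercalate]

theorem pv_join_cons (a : List Char) (xs : List (List Char)) (hxs : xs ≠ []) :
    PySem.Chars.join ['\n'] (a :: xs) = a ++ '\n' :: PySem.Chars.join ['\n'] xs := by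
  cases xs with
  | nil => exact absurd rfl hxs
  | cons b t => simp [PySem.Chars.join, List.intercalate]

theorem pv_stampLoop_ne_nil (sid : List Char) (xs : List (List Char)) (hxs : xs ≠ []) :
    pvStampLoopA sid xs ≠ [] := by
  cases xs with
  | nil => exact absurd rfl hxs
  | cons s ss =>
    rw [pvStampLoopA]
    by_cases hs : PySem.Chars.strip s ≠ [] <;> simp [hs]

-- splicing into a draft that starts with a blank line recurses into the tail
theorem pv_spliceB_blank_line (sid l rest : List Char)
    (hall : ∀ c ∈ l, PySem.Chars.isspace c) :
    pvSpliceB sid (l ++ '\n' :: rest) = l ++ '\n' :: pvSpliceB sid rest := by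
  have hlsl : PySem.Chars.lstrip l = [] := pv_lstrip_eq_nil l hall
  have hlstrip : PySem.Chars.lstrip (l ++ '\n' :: rest) = PySem.Chars.lstrip rest := by
    simp only [PySem.Chars.lstrip] at hlsl ⊢
    rw [List.dropWhile_append]
    simp [hlsl, (by decide : PySem.Chars.isspace '\n' = true)]
  by_cases hlr : PySem.Chars.lstrip rest = []
  · simp [pvSpliceB, hlstrip, hlr]
  · simp only [pvSpliceB, hlstrip, hlr, ite_false]
    have hk : (PySem.Chars.lstrip rest).length ≤ rest.length := by
      simpa [PySem.Chars.lstrip] using List.length_dropWhile_le PySem.Chars.isspace rest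
    have htk : (l ++ '\n' :: rest).take
        ((l ++ '\n' :: rest).length - (PySem.Chars.lstrip rest).length) =
        l ++ '\n' :: rest.take (rest.length - (PySem.Chars.lstrip rest).length) := by
      have harith : (l ++ '\n' :: rest).length - (PySem.Chars.lstrip rest).length =
          l.length + ((rest.length - (PySem.Chars.lstrip rest).length) + 1) := by
        simp; omega
      rw [harith, List.take_length_add_append, List.take_succ_cons]
    rw [htk]
    simp

-- the core equivalence, by strong induction on the length of cs
theorem pv_main : ∀ (n : Nat) (cs : List Char) (sid : List Char), cs.length ≤ n →
    pvJoinA sid cs = pvSpliceB sid cs := by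
  intro n
  induction n with
  | zero =>
    intro cs sid h
    have : cs = [] := by cases cs <;> simp_all
    subst this
    simp [pvJoinA, pvSpliceB, PySem.Chars.lstrip, pv_splitOn_no_nl [] (by simp),
      pvStampLoopA, PySem.Chars.strip, PySem.Chars.rstrip, PySem.Chars.join, List.intercalate]
  | succ n ih =>
    intro cs sid hlen
    rcases pv_decomp cs with hno | ⟨l, rest, hcs, hl⟩
    · -- cs has no newline: a single line
      rw [pvJoinA, pv_splitOn_no_nl cs hno]
      by_cases hblank : PySem.Chars.strip cs = []
      · -- entirely whitespace: both sides are cs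
        have hls : PySem.Chars.lstrip cs = [] :=
          pv_lstrip_eq_nil cs ((pv_strip_eq_nil_iff cs).mp hblank)
        simp [pvStampLoopA, hblank, PySem.Chars.join, List.intercalate, pvSpliceB, hls]
      · -- the single line gets stamped
        have hex : ∃ c ∈ cs, ¬ PySem.Chars.isspace c := by
          by_contra h
          push Not at h
          exact hblank ((pv_strip_eq_nil_iff cs).mpr (fun c hc => by simpa using h c hc))
        have hls : PySem.Chars.lstrip cs ≠ [] := pv_lstrip_ne_nil cs hex
        have hnob : '\n' ∉ PySem.Chars.lstrip cs :=
          fun h => hno ((List.dropWhile_sublist PySem.Chars.isspace).mem h)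
        simp only [pvStampLoopA, hblank, ne_eq, not_false_iff, if_pos]
        rw [pv_join_one]
        simp only [pvSpliceB, hls, ite_false, pv_find_no_nl _ hnob, ite_true,
          pv_take_head cs]
        rw [pv_rstrip_split cs hex, pvMarkerA, pvMarkerB]
        simp
    · -- cs = l ++ '\n' :: rest with l newline-free
      subst hcs
      rw [pvJoinA, pv_splitOn_first_line l rest hl]
      by_cases hblank : PySem.Chars.strip l = []
      · -- first line blank: both sides keep it and recurse into rest
        have hall : ∀ c ∈ l, PySem.Chars.isspace c := (pv_strip_eq_nil_iff l).mp hblank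
        simp only [pvStampLoopA, hblank, ne_eq, not_true, ite_false]
        rw [pv_join_cons l _ (pv_stampLoop_ne_nil sid _ (pv_splitOn_ne_nil rest))]
        have hrec := ih rest sid (by simp at hlen; omega)
        rw [pvJoinA] at hrec
        rw [hrec, pv_spliceB_blank_line sid l rest hall]
      · -- first line has content: stamp it here
        have hex : ∃ c ∈ l, ¬ PySem.Chars.isspace c := by
          by_contra h
          push Not at h
          exact hblank ((pv_strip_eq_nil_iff l).mpr (fun c hc => by simpa using h c hc))
        have hlsl : PySem.Chars.lstrip l ≠ [] := pv_lstrip_ne_nil l hex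
        have hnobl : '\n' ∉ PySem.Chars.lstrip l :=
          fun h => hl ((List.dropWhile_sublist PySem.Chars.isspace).mem h)
        simp only [pvStampLoopA, hblank, ne_eq, not_false_iff, if_pos]
        rw [pv_join_cons _ _ (pv_splitOn_ne_nil rest), pv_join_splitOn rest.length rest le_rfl]
        -- B side
        have hlstrip : PySem.Chars.lstrip (l ++ '\n' :: rest) =
            PySem.Chars.lstrip l ++ '\n' :: rest := by
          simp only [PySem.Chars.lstrip] at hlsl ⊢
          rw [List.dropWhile_append]
          simp [List.isEmpty_iff, hlsl]
        have hk2 : (PySem.Chars.lstrip l).length ≤ l.length := by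
          simpa [PySem.Chars.lstrip] using List.length_dropWhile_le PySem.Chars.isspace l
        have htake : (l ++ '\n' :: rest).take
            ((l ++ '\n' :: rest).length - (PySem.Chars.lstrip l ++ '\n' :: rest).length) =
            List.takeWhile PySem.Chars.isspace l := by
          have harith : (l ++ '\n' :: rest).length - (PySem.Chars.lstrip l ++ '\n' :: rest).length =
              l.length - (PySem.Chars.lstrip l).length := by
            simp; omega
          rw [harith, List.take_append_of_le_length (by omega), pv_take_head l]
        have hfne : ¬ ((PySem.Chars.lstrip l).length : Int) = -1 := by omega
        simp only [pvSpliceB, hlstrip, if_neg,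
          List.append_eq_nil_iff, List.cons_ne_nil, and_false, not_false_iff,
          pv_find_nl _ _ hnobl, hfne, Int.toNat_natCast, List.take_left, List.drop_left, htake]
        rw [pv_rstrip_split l hex, pvMarkerA, pvMarkerB]
-- ===== VERDICT (by name: the statement is the Claim_ definition above) =====
theorem stamp_auto_marker_py_spec : Claim_equal_stamp_auto_marker_py := by
  intro draft scene_id _
  unfold Spec_stamp_auto_marker_py stamp_auto_marker_py stamp_auto_marker_py_alt
  congr 1
  exact congrArg String.ofList (pv_main draft.toList.length draft.toList scene_id.toList le_rfl)
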